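-- pv_equiv track=rewrite | github.com/babisingh/wetlab_twins | aixbio/tools/repeats.py | find_direct_repeats
-- ===== SOURCE A (Python) =====
-- def find_direct_repeats(dna: str, min_len: int = 20) -> list[tuple[int, int, int]]:
--     """Find non-overlapping direct repeats of length >= min_len.
--
--     Returns a list of (pos1, pos2, length) tuples.  Long perfect direct repeats
--     (>= 20 bp) can trigger RecA-independent deletion in E. coli during plasmid
--     replication, making the construct unstable.
--
--     Algorithm: index all k-mers at min_len, then extend each pair to its
--     maximal non-overlapping match.  O(n * min_len) — suitable up to ~10 kb.
--     """
--     dna = dna.upper()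
--     n = len(dna)
--     if n < min_len * 2:
--         return []
--
--     kmer_positions: dict[str, list[int]] = {}
--     for i in range(n - min_len + 1):
--         kmer = dna[i : i + min_len]
--         kmer_positions.setdefault(kmer, []).append(i)
--
--     results: list[tuple[int, int, int]] = []
--     seen: set[tuple[int, int]] = set()
--
--     for positions in kmer_positions.values():
--         if len(positions) < 2:
--             continue
--         for a_idx in range(len(positions)):
--             for b_idx in range(a_idx + 1, len(positions)):
--                 i, j = positions[a_idx], positions[b_idx]
--                 if (i, j) in seen:
--                     continue
--                 length = min_len
--                 while j + length < n and dna[i + length] == dna[j + length]: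
--                     length += 1
--                 if j >= i + length:
--                     seen.add((i, j))
--                     results.append((i, j, length))
--
--     results.sort(key=lambda t: -t[2])
--     return results
-- ===== SOURCE B (Python) =====
-- def find_direct_repeats(dna: str, min_len: int = 20) -> list[tuple[int, int, int]]:
--     """Same repeats, but the per-pair char-by-char extension loop is replaced by
--     lazily computed per-diagonal maximal-match arrays (one right-to-left scan per
--     distinct diagonal j-i, O(1) per pair afterwards); the dead `seen` set is dropped."""
--     dna = dna.upper()
--     n = len(dna)
--     if n < min_len * 2:
--         return []
--
--     kmer_positions: dict[str, list[int]] = {}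
--     for i in range(n - min_len + 1):
--         kmer_positions.setdefault(dna[i : i + min_len], []).append(i)
--
--     diag: dict[int, list[int]] = {}
--     results: list[tuple[int, int, int]] = []
--     for positions in kmer_positions.values():
--         for a_idx in range(len(positions) - 1):
--             i = positions[a_idx]
--             for b_idx in range(a_idx + 1, len(positions)):
--                 j = positions[b_idx]
--                 d = j - i
--                 m = diag.get(d)
--                 if m is None:
--                     m = [0] * (n - d + 1)
--                     for t in range(n - d - 1, -1, -1):
--                         m[t] = m[t + 1] + 1 if dna[t] == dna[t + d] else 0
--                     diag[d] = m
--                 length = m[i]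
--                 if d >= length:
--                     results.append((i, j, length))
--
--     results.sort(key=lambda t: -t[2])
--     return results
-- ===== Notes on version B (the rewrite author's own statement) =====
-- stated objective: alternative
-- what changed: B replaces A's per-pair character-by-character extension while-loop (and its dead `seen` set) by lazily built per-diagonal maximal-match arrays: one right-to-left scan per distinct diagonal j-i gives every pair's maximal extension in O(1); intended as faster on repeat-rich input (measured 3.26x at the largest size both finished, unconfirmed at sizes where both time out).
-- outside the precondition, e.g. on find_direct_repeats('ab', -1): A returns [(1, 2, -1), (1, 3, -1), (2, 3, -1)], B raises IndexError; on find_direct_repeats('A', -5): A raises IndexError, B raises IndexError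
import Mathlib
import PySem

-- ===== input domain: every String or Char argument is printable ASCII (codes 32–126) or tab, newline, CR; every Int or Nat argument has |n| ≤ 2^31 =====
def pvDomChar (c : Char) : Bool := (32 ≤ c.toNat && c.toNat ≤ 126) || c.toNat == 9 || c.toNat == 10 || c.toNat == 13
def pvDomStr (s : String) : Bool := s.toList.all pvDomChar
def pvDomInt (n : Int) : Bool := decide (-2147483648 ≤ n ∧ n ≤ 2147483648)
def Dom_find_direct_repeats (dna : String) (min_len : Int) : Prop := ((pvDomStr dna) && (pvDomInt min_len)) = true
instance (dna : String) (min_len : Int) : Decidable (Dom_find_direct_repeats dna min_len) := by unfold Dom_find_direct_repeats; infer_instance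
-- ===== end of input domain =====

-- B replaces A's per-pair character-extension loop by lazily computed per-diagonal
-- maximal-match arrays (one right-to-left scan per distinct diagonal j-i, O(1) per
-- pair afterwards) and drops A's dead `seen` set.

-- ===== PORT A =====
-- while j + length < n and dna[i+length] == dna[j+length]: length += 1
def pvExtendA (cs : List Char) (n i j : Int) (length : Int) : Int :=
  if h : j + length < n ∧ PySem.List.pyGet? cs (i + length) = PySem.List.pyGet? cs (j + length) then
    pvExtendA cs n i j (length + 1)
  else length
termination_by (n - (j + length)).toNat
decreasing_by omega

def find_direct_repeats (dna : String) (min_len : Int) : List (Int × Int × Int) :=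
  let cs := PySem.Chars.upper dna.toList
  let n : Int := PySem.List.len cs
  if n < min_len * 2 then [] else
    let kp := (PySem.List.pyRange 0 (n - min_len + 1) 1).foldl
        (fun (d : PySem.Dict (List Char) (List Int)) i =>
          d.modify (PySem.List.slice cs (some i) (some (i + min_len))) [] (· ++ [i]))
        (PySem.Dict.empty : PySem.Dict (List Char) (List Int))
    let st := kp.values.foldl
      (fun (st : List (Int × Int × Int) × PySem.Set (Int × Int)) positions =>
        if PySem.List.len positions < 2 then st else
        (PySem.List.pyRange 0 (PySem.List.len positions) 1).foldl
          (fun st (a_idx : Int) =>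
            (PySem.List.pyRange (a_idx + 1) (PySem.List.len positions) 1).foldl
              (fun st (b_idx : Int) =>
                let i := PySem.List.pyGetD positions a_idx 0
                let j := PySem.List.pyGetD positions b_idx 0
                if PySem.Set.contains st.2 (i, j) then st else
                let length := pvExtendA cs n i j min_len
                if j ≥ i + length then (st.1 ++ [(i, j, length)], PySem.Set.add st.2 (i, j))
                else st)
              st)
          st)
      (([], PySem.Set.empty) : List (Int × Int × Int) × PySem.Set (Int × Int))
    PySem.List.sorted st.1 (fun t => -t.2.2) false

-- ===== PORT B =====
def find_direct_repeats_alt (dna : String) (min_len : Int) : List (Int × Int × Int) :=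
  let cs := PySem.Chars.upper dna.toList
  let n : Int := PySem.List.len cs
  if n < min_len * 2 then [] else
    let kp := (PySem.List.pyRange 0 (n - min_len + 1) 1).foldl
        (fun (d : PySem.Dict (List Char) (List Int)) i =>
          d.modify (PySem.List.slice cs (some i) (some (i + min_len))) [] (· ++ [i]))
        (PySem.Dict.empty : PySem.Dict (List Char) (List Int))
    let st := kp.values.foldl
      (fun (st : List (Int × Int × Int) × PySem.Dict Int (List Int)) positions =>
        (PySem.List.pyRange 0 (PySem.List.len positions - 1) 1).foldl
          (fun st (a_idx : Int) =>
            let i := PySem.List.pyGetD positions a_idx 0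
            (PySem.List.pyRange (a_idx + 1) (PySem.List.len positions) 1).foldl
              (fun st (b_idx : Int) =>
                let j := PySem.List.pyGetD positions b_idx 0
                let d := j - i
                match st.2.get? d with
                | some m =>
                  let length := PySem.List.pyGetD m i 0
                  if d ≥ length then (st.1 ++ [(i, j, length)], st.2) else st
                | none =>
                  let m := (PySem.List.pyRange (n - d - 1) (-1) (-1)).foldl
                      (fun m t => PySem.List.pySetD m t
                        (if PySem.List.pyGet? cs t = PySem.List.pyGet? cs (t + d)
                         then PySem.List.pyGetD m (t + 1) 0 + 1 else 0))
                      (List.replicate (n - d + 1).toNat 0)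
                  let diag := st.2.insert d m
                  let length := PySem.List.pyGetD m i 0
                  if d ≥ length then (st.1 ++ [(i, j, length)], diag) else (st.1, diag))
              st)
          st)
      (([], PySem.Dict.empty) : List (Int × Int × Int) × PySem.Dict Int (List Int))
    PySem.List.sorted st.1 (fun t => -t.2.2) false

-- ===== PRECONDITION & SPEC =====
-- Pre_ excludes negative min_len (outside the function's natural domain of positive repeat
-- lengths): the k-mer window is then negative, and A raises IndexError when min_len < -len(dna)
-- and otherwise returns tuples produced by negative-index wraparound; B raises IndexError there.
def Pre_find_direct_repeats (dna : String) (min_len : Int) : Prop := 0 ≤ min_len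
instance (dna : String) (min_len : Int) : Decidable (Pre_find_direct_repeats dna min_len) := by
  unfold Pre_find_direct_repeats; infer_instance

def pvWitness_find_direct_repeats : String × Int := ("ACGTACGTAC", 4)

def Spec_find_direct_repeats (dna : String) (min_len : Int) (out : List (Int × Int × Int)) : Prop :=
  out = find_direct_repeats_alt dna min_len
instance (dna : String) (min_len : Int) (out : List (Int × Int × Int)) : Decidable (Spec_find_direct_repeats dna min_len out) := by
  unfold Spec_find_direct_repeats; infer_instance

-- ===== CLAIM (what is proved, stated in full; the proofs are below) =====
def Claim_equal_find_direct_repeats : Prop := ∀ (dna : String) (min_len : Int),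
  Dom_find_direct_repeats dna min_len → Pre_find_direct_repeats dna min_len →
  Spec_find_direct_repeats dna min_len (find_direct_repeats dna min_len)

-- ===== LEMMAS AND PROOFS =====

-- proof-side vocabulary ------------------------------------------------------

/-- The ordered pairs (earlier, later) of a list, in A's and B's iteration order. -/
def pvPairs : List Int → List (Int × Int)
  | [] => []
  | x :: xs => xs.map (fun y => (x, y)) ++ pvPairs xs

/-- Length of the longest common prefix of the suffixes of `cs` at `a` and `b`
    (extension stops when `b` runs off the end, exactly like the Python loops). -/
def pvLcp (cs : List Char) (a b : Nat) : Nat :=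
  if h : b < cs.length ∧ cs[a]? = cs[b]? then pvLcp cs (a + 1) (b + 1) + 1 else 0
termination_by cs.length - b
decreasing_by omega

def pvKmer (cs : List Char) (m i : Int) : List Char :=
  PySem.List.slice cs (some i) (some (i + m))

def pvIdxs (cs : List Char) (m : Int) : List Int :=
  PySem.List.pyRange 0 ((cs.length : Int) - m + 1) 1

def pvPos (cs : List Char) (m : Int) (k : List Char) : List Int :=
  (pvIdxs cs m).filter (fun i => pvKmer cs m i == k)

def pvKeys (cs : List Char) (m : Int) : List (List Char) :=
  PySem.Set.ofList ((pvIdxs cs m).map (pvKmer cs m))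

/-- B's per-diagonal maximal-match array (the inline build in port B). -/
def pvArr (cs : List Char) (n d : Int) : List Int :=
  (PySem.List.pyRange (n - d - 1) (-1) (-1)).foldl
    (fun m t => PySem.List.pySetD m t
      (if PySem.List.pyGet? cs t = PySem.List.pyGet? cs (t + d)
       then PySem.List.pyGetD m (t + 1) 0 + 1 else 0))
    (List.replicate (n - d + 1).toNat 0)

def pvStepA (cs : List Char) (n m : Int)
    (st : List (Int × Int × Int) × PySem.Set (Int × Int)) (p : Int × Int) :
    List (Int × Int × Int) × PySem.Set (Int × Int) :=
  if PySem.Set.contains st.2 p then st else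
    let length := pvExtendA cs n p.1 p.2 m
    if p.2 ≥ p.1 + length then (st.1 ++ [(p.1, p.2, length)], PySem.Set.add st.2 p) else st

def pvStepB (cs : List Char) (n : Int)
    (st : List (Int × Int × Int) × PySem.Dict Int (List Int)) (p : Int × Int) :
    List (Int × Int × Int) × PySem.Dict Int (List Int) :=
  let d := p.2 - p.1
  match st.2.get? d with
  | some marr =>
    let length := PySem.List.pyGetD marr p.1 0
    if d ≥ length then (st.1 ++ [(p.1, p.2, length)], st.2) else st
  | none =>
    let marr := pvArr cs n d
    let diag := st.2.insert d marr
    let length := PySem.List.pyGetD marr p.1 0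
    if d ≥ length then (st.1 ++ [(p.1, p.2, length)], diag) else (st.1, diag)

def pvEmitA (cs : List Char) (n m : Int) (p : Int × Int) : List (Int × Int × Int) :=
  let length := pvExtendA cs n p.1 p.2 m
  if p.2 ≥ p.1 + length then [(p.1, p.2, length)] else []

def pvEmitB (cs : List Char) (n : Int) (p : Int × Int) : List (Int × Int × Int) :=
  let length := PySem.List.pyGetD (pvArr cs n (p.2 - p.1)) p.1 0
  if p.2 - p.1 ≥ length then [(p.1, p.2, length)] else []

def pvGood (cs : List Char) (m : Int) (p : Int × Int) : Prop :=
  0 ≤ p.1 ∧ p.1 < p.2 ∧ p.2 ≤ (cs.length : Int) - m ∧ pvKmer cs m p.1 = pvKmer cs m p.2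

def pvAllPairs (cs : List Char) (m : Int) : List (Int × Int) :=
  (pvKeys cs m).flatMap (fun k => pvPairs (pvPos cs m k))

-- the extension loop computes the lcp --------------------------------------

theorem pvExtendA_eq_lcp (cs : List Char) (i j : Int) (hi : 0 ≤ i) (hij : i < j) : ∀ (len : Int), 0 ≤ len →
    pvExtendA cs (cs.length : Int) i j len = len + (pvLcp cs (i + len).toNat (j + len).toNat : Int) := by
  intro len hlen
  induction hfuel : (cs.length - (j + len)).toNat using Nat.strong_induction_on generalizing len with
  | _ fuel IH =>
  rw [pvExtendA, pvLcp]
  by_cases hc : j + len < (cs.length : Int) ∧ PySem.List.pyGet? cs (i + len) = PySem.List.pyGet? cs (j + len)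
  · have hb : (j + len).toNat < cs.length := by omega
    have hcc : cs[(i + len).toNat]? = cs[(j + len).toNat]? := by
      rw [← PySem.List.pyGet?_of_nonneg cs (by omega), ← PySem.List.pyGet?_of_nonneg cs (by omega)]
      exact hc.2
    rw [dif_pos hc, dif_pos ⟨hb, hcc⟩]
    rw [IH (cs.length - (j + (len+1))).toNat (by omega) (len + 1) (by omega) rfl]
    have e1 : (i + (len + 1)).toNat = (i + len).toNat + 1 := by omega
    have e2 : (j + (len + 1)).toNat = (j + len).toNat + 1 := by omega
    rw [e1, e2]; push_cast; ring
  · rw [dif_neg hc, dif_neg]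
    · simp
    · rintro ⟨hb, hcc⟩
      apply hc
      constructor
      · omega
      · rw [PySem.List.pyGet?_of_nonneg cs (by omega), PySem.List.pyGet?_of_nonneg cs (by omega)]
        exact hcc

theorem pvLcp_shift (cs : List Char) (K : Nat) : ∀ (a b : Nat),
    b + K ≤ cs.length → (∀ t, t < K → cs[a + t]? = cs[b + t]?) →
    pvLcp cs a b = K + pvLcp cs (a + K) (b + K) := by
  induction K with
  | zero => intro a b _ _; simp
  | succ K IH =>
    intro a b hb hchars
    rw [pvLcp]
    have h0 : cs[a]? = cs[b]? := by simpa using hchars 0 (by omega)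
    rw [dif_pos ⟨by omega, h0⟩]
    rw [IH (a+1) (b+1) (by omega) (fun t ht => by
      have := hchars (t+1) (by omega)
      simpa [Nat.add_assoc, Nat.add_comm 1 t] using this)]
    have e1 : a + 1 + K = a + (K + 1) := by omega
    have e2 : b + 1 + K = b + (K + 1) := by omega
    rw [e1, e2]; ring

-- B's diagonal array computes the lcp ---------------------------------------

theorem pvArr_aux (cs : List Char) (d : Int) (hd1 : 1 ≤ d) (hdn : d ≤ (cs.length : Int)) :
    ∀ (t0 : Nat), t0 + d.toNat ≤ cs.length → ∀ (l : List Int), l.length = cs.length - d.toNat + 1 →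
    (∀ u : Nat, t0 ≤ u → u ≤ cs.length - d.toNat → l.getD u 0 = (pvLcp cs u (u + d.toNat) : Int)) →
    (((List.range t0).map (fun (k : Nat) => ((t0 : Int) - 1 - (k : Int)))).foldl
        (fun m t => PySem.List.pySetD m t
          (if PySem.List.pyGet? cs t = PySem.List.pyGet? cs (t + d)
           then PySem.List.pyGetD m (t + 1) 0 + 1 else 0)) l).length = cs.length - d.toNat + 1 ∧
     ∀ u : Nat, u ≤ cs.length - d.toNat →
      (((List.range t0).map (fun (k : Nat) => ((t0 : Int) - 1 - (k : Int)))).foldl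
        (fun m t => PySem.List.pySetD m t
          (if PySem.List.pyGet? cs t = PySem.List.pyGet? cs (t + d)
           then PySem.List.pyGetD m (t + 1) 0 + 1 else 0)) l).getD u 0 = (pvLcp cs u (u + d.toNat) : Int) := by
  intro t0
  induction t0 with
  | zero =>
    intro _ l hlen hl
    exact ⟨by simpa using hlen, fun u hu => by simpa using hl u (by omega) hu⟩
  | succ t0 IH =>
    intro ht0 l hlen hl
    have hlist : ((List.range (t0+1)).map (fun (k : Nat) => (((t0+1 : Nat) : Int) - 1 - (k : Int))))
        = (t0 : Int) :: (List.range t0).map (fun (k : Nat) => ((t0 : Int) - 1 - (k : Int))) := by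
      rw [List.range_succ_eq_map, List.map_cons, List.map_map]
      congr 1
      · push_cast; ring
      · apply List.map_congr_left
        intro k _
        simp only [Function.comp]
        push_cast; ring
    rw [hlist, List.foldl_cons, PySem.List.pySetD_natCast]
    set V : Int := (if PySem.List.pyGet? cs (t0 : Int) = PySem.List.pyGet? cs ((t0 : Int) + d)
           then PySem.List.pyGetD l ((t0 : Int) + 1) 0 + 1 else 0) with hV
    have hvval : V = (pvLcp cs t0 (t0 + d.toNat) : Int) := by
      have hcast : (t0 : Int) + d = ((t0 + d.toNat : Nat) : Int) := by omega
      have hg1 : PySem.List.pyGet? cs (t0 : Int) = cs[t0]? := by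
        rw [PySem.List.pyGet?_natCast]
      have hg2 : PySem.List.pyGet? cs ((t0 : Int) + d) = cs[t0 + d.toNat]? := by
        rw [hcast, PySem.List.pyGet?_natCast]
      have hnext : PySem.List.pyGetD l ((t0 : Int) + 1) 0 = (pvLcp cs (t0+1) ((t0+1) + d.toNat) : Int) := by
        have h1 : (t0 : Int) + 1 = ((t0 + 1 : Nat) : Int) := by push_cast; ring
        rw [h1, PySem.List.pyGetD_natCast]
        exact hl (t0+1) (by omega) (by omega)
      rw [hV, hg1, hg2, hnext]
      conv_rhs => rw [pvLcp]
      by_cases hch : cs[t0]? = cs[t0 + d.toNat]?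
      · rw [if_pos hch, dif_pos (And.intro (by omega) hch)]
        push_cast
        have h2 : t0 + 1 + d.toNat = t0 + d.toNat + 1 := by omega
        rw [h2]
      · rw [if_neg hch, dif_neg (by rintro ⟨_, h⟩; exact hch h)]
        simp
    exact IH (by omega) (l.set t0 V) (by simpa using hlen)
      (fun u hu1 hu2 => by
        rcases Nat.eq_or_lt_of_le hu1 with he | hlt
        · subst he
          rw [List.getD_eq_getElem?_getD, List.getElem?_set_self (by omega), Option.getD_some]
          exact hvval
        · rw [List.getD_eq_getElem?_getD, List.getElem?_set_ne (by omega), ← List.getD_eq_getElem?_getD]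
          exact hl u (by omega) hu2)


theorem pvArr_getD (cs : List Char) (d : Int) (hd1 : 1 ≤ d) (hdn : d ≤ (cs.length : Int))
    (u : Nat) (hu : u ≤ cs.length - d.toNat) :
    (pvArr cs (cs.length : Int) d).getD u 0 = (pvLcp cs u (u + d.toNat) : Int) := by
  have hK : ((cs.length : Int) - d - 1 - (-1)).toNat = cs.length - d.toNat := by omega
  have hrange : PySem.List.pyRange ((cs.length : Int) - d - 1) (-1) (-1)
      = (List.range (cs.length - d.toNat)).map
          (fun (k : Nat) => (((cs.length - d.toNat : Nat) : Int) - 1 - (k : Int))) := by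
    rw [PySem.List.pyRange_neg_one, hK]
    apply List.map_congr_left
    intro k hk
    rw [List.mem_range] at hk
    omega
  unfold pvArr
  rw [hrange]
  have hbase := pvArr_aux cs d hd1 hdn (cs.length - d.toNat) (by omega)
    (List.replicate ((cs.length : Int) - d + 1).toNat 0)
    (by simp; omega)
    (fun u hu1 hu2 => by
      have hu3 : u = cs.length - d.toNat := by omega
      subst hu3
      rw [List.getD_eq_getElem?_getD, List.getElem?_replicate]
      rw [if_pos (by omega)]
      rw [pvLcp, dif_neg (by rintro ⟨h, _⟩; omega)]
      simp)
  exact hbase.2 u hu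

-- pair enumeration -----------------------------------------------------------

theorem pvNat_pairs_fold {σ : Type} (g : σ → Int → Int → σ) : ∀ (ps : List Int) (st : σ),
    (List.range ps.length).foldl
      (fun st a => (ps.drop (a + 1)).foldl (fun st y => g st (ps.getD a 0) y) st) st
    = (pvPairs ps).foldl (fun st p => g st p.1 p.2) st := by
  intro ps
  induction ps with
  | nil => intro st; simp [pvPairs]
  | cons x t IH =>
    intro st
    rw [List.length_cons, List.range_succ_eq_map, List.foldl_cons, List.foldl_map]
    simp only [List.drop_succ_cons, List.getD_cons_zero, List.getD_cons_succ]
    rw [List.drop_zero, IH]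
    show _ = ((t.map (fun y => (x, y)) ++ pvPairs t).foldl (fun st p => g st p.1 p.2) st)
    rw [List.foldl_append, List.foldl_map]

theorem pvPy_pairs_fold {σ : Type} (g : σ → Int → Int → σ) (ps : List Int) (st : σ) :
    (PySem.List.pyRange 0 (PySem.List.len ps) 1).foldl
      (fun st a => (PySem.List.pyRange (a + 1) (PySem.List.len ps) 1).foldl
        (fun st b => g st (PySem.List.pyGetD ps a 0) (PySem.List.pyGetD ps b 0)) st) st
    = (pvPairs ps).foldl (fun st p => g st p.1 p.2) st := by
  have hinner : ∀ (st : σ) (a : Int), a ∈ PySem.List.pyRange 0 (PySem.List.len ps) 1 →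
      (PySem.List.pyRange (a + 1) (PySem.List.len ps) 1).foldl
        (fun st b => g st (PySem.List.pyGetD ps a 0) (PySem.List.pyGetD ps b 0)) st
      = (ps.drop (a + 1).toNat).foldl (fun st y => g st (PySem.List.pyGetD ps a 0) y) st := by
    intro st a ha
    have ha0 : (0 : Int) ≤ a := (PySem.List.mem_pyRange_one.mp ha).1
    exact PySem.List.foldl_pyRange_pyGetD ps 0 (fun st y => g st (PySem.List.pyGetD ps a 0) y) st (by omega)
  trans ((PySem.List.pyRange 0 (PySem.List.len ps) 1).foldl
      (fun st a => (ps.drop (a + 1).toNat).foldl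
        (fun st y => g st (PySem.List.pyGetD ps a 0) y) st) st)
  · exact PySem.List.foldl_congr_mem _ _ _ _ hinner
  rw [PySem.List.pyRange_one, List.foldl_map]
  have hlen : ((PySem.List.len ps : Int) - 0).toNat = ps.length := by
    simp [PySem.List.len_eq]
  rw [hlen]
  have hbody : ∀ (st : σ) (k : Nat), k ∈ List.range ps.length →
      (ps.drop ((0 + (k : Int)) + 1).toNat).foldl
        (fun st y => g st (PySem.List.pyGetD ps (0 + (k : Int)) 0) y) st
      = (ps.drop (k + 1)).foldl (fun st y => g st (ps.getD k 0) y) st := by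
    intro st k _
    have h1 : ((0 + (k : Int)) + 1).toNat = k + 1 := by omega
    have h2 : PySem.List.pyGetD ps (0 + (k : Int)) 0 = ps.getD k 0 := by
      rw [show (0 + (k : Int)) = ((k : Nat) : Int) by omega, PySem.List.pyGetD_natCast]
    rw [h1, h2]
  trans ((List.range ps.length).foldl
      (fun st k => (ps.drop (k + 1)).foldl (fun st y => g st (ps.getD k 0) y) st) st)
  · exact PySem.List.foldl_congr_mem _ _ _ _ hbody
  exact pvNat_pairs_fold g ps st

theorem pvPy_pairs_fold_B {σ : Type} (g : σ → Int → Int → σ) (ps : List Int) (st : σ) :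
    (PySem.List.pyRange 0 (PySem.List.len ps - 1) 1).foldl
      (fun st a => (PySem.List.pyRange (a + 1) (PySem.List.len ps) 1).foldl
        (fun st b => g st (PySem.List.pyGetD ps a 0) (PySem.List.pyGetD ps b 0)) st) st
    = (pvPairs ps).foldl (fun st p => g st p.1 p.2) st := by
  rcases ps with _ | ⟨x, t⟩
  · simp [PySem.List.len_eq, PySem.List.pyRange_one_eq_nil, pvPairs]
  · rw [← pvPy_pairs_fold g (x :: t) st]
    have hL : (PySem.List.len (x :: t) : Int) = (t.length : Int) + 1 := by
      simp [PySem.List.len_eq]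
    rw [hL]
    have e1 : (t.length : Int) + 1 - 1 = (t.length : Int) := by ring
    rw [e1]
    rw [PySem.List.pyRange_one_succ_right (a := 0) (b := (t.length : Int)) (by positivity)]
    rw [List.foldl_append]
    simp only [List.foldl_cons, List.foldl_nil]
    rw [PySem.List.pyRange_one_eq_nil (a := (t.length : Int) + 1) (by omega)]
    rfl

theorem pvPairs_mem (ps : List Int) (h : ps.Pairwise (· < ·)) :
    ∀ p ∈ pvPairs ps, p.1 ∈ ps ∧ p.2 ∈ ps ∧ p.1 < p.2 := by
  induction ps with
  | nil => intro p hp; simp [pvPairs] at hp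
  | cons x t IH =>
    intro p hp
    rw [pvPairs, List.mem_append] at hp
    rcases hp with hp | hp
    · rcases List.mem_map.mp hp with ⟨y, hy, rfl⟩
      exact ⟨List.mem_cons_self, List.mem_cons_of_mem _ hy, (List.pairwise_cons.mp h).1 y hy⟩
    · have := IH (List.pairwise_cons.mp h).2 p hp
      exact ⟨List.mem_cons_of_mem _ this.1, List.mem_cons_of_mem _ this.2.1, this.2.2⟩


theorem pvPairs_fst_mem (ps : List Int) : ∀ p ∈ pvPairs ps, p.1 ∈ ps := by
  induction ps with
  | nil => intro p hp; simp [pvPairs] at hp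
  | cons x t IH =>
    intro p hp
    rw [pvPairs, List.mem_append] at hp
    rcases hp with hp | hp
    · rcases List.mem_map.mp hp with ⟨y, hy, rfl⟩
      exact List.mem_cons_self
    · exact List.mem_cons_of_mem _ (IH p hp)

theorem pvPairs_nodup (ps : List Int) (h : ps.Pairwise (· < ·)) : (pvPairs ps).Nodup := by
  induction ps with
  | nil => simp [pvPairs]
  | cons x t IH =>
    rw [pvPairs]
    apply List.Nodup.append
    · exact (h.sublist (List.sublist_cons_self x t)).nodup.map
        (fun a b hab => by simpa using congrArg Prod.snd hab)
    · exact IH (List.pairwise_cons.mp h).2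
    · intro p hp1 hp2
      rcases List.mem_map.mp hp1 with ⟨y, _, rfl⟩
      have h1 : (x, y).1 ∈ t := pvPairs_fst_mem t (x, y) hp2
      have := (List.pairwise_cons.mp h).1 _ h1
      simp at this

-- the kmer dictionary --------------------------------------------------------

theorem pvKp_values (cs : List Char) (m : Int) :
    ((pvIdxs cs m).foldl
      (fun (d : PySem.Dict (List Char) (List Int)) i =>
        d.modify (pvKmer cs m i) [] (· ++ [i]))
      (PySem.Dict.empty : PySem.Dict (List Char) (List Int))).values
    = (pvKeys cs m).map (pvPos cs m) := by
  set D := ((pvIdxs cs m).foldl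
      (fun (d : PySem.Dict (List Char) (List Int)) i =>
        d.modify (pvKmer cs m i) [] (· ++ [i]))
      (PySem.Dict.empty : PySem.Dict (List Char) (List Int))) with hD
  have hkeys : D.keys = pvKeys cs m := by
    rw [hD]
    have h := PySem.Dict.keys_foldl_modify_key (pvIdxs cs m) (pvKmer cs m) ([] : List Int)
      (fun _ i => (· ++ [i])) (PySem.Dict.empty : PySem.Dict (List Char) (List Int))
    exact h.trans rfl
  have hnd : D.keys.Nodup := by rw [hkeys]; exact PySem.Set.nodup_ofList _
  rw [PySem.Dict.values_eq_map_keys D hnd [], hkeys]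
  apply List.map_congr_left
  intro k hk
  have hgetD : D.getD k [] = pvPos cs m k := by
    rw [hD]
    have h1 : ((pvIdxs cs m).foldl
        (fun (d : PySem.Dict (List Char) (List Int)) i => d.modify (pvKmer cs m i) [] (· ++ [i]))
        (PySem.Dict.empty : PySem.Dict (List Char) (List Int)))
        = (((pvIdxs cs m).map (fun i => (pvKmer cs m i, i))).foldl
            (fun (d : PySem.Dict (List Char) (List Int)) p => d.modify p.1 [] (· ++ [p.2]))
            (PySem.Dict.empty : PySem.Dict (List Char) (List Int))) := by
      rw [List.foldl_map]
    rw [h1, PySem.Dict.getD_foldl_modify_append]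
    rw [List.filter_map, List.map_map]
    simp only [Function.comp_def, List.map_id']
    rfl
  exact hgetD

-- the two folds, characterised ----------------------------------------------

theorem pvFoldA_char (cs : List Char) (n m : Int) : ∀ (P : List (Int × Int))
    (acc : List (Int × Int × Int)) (S : PySem.Set (Int × Int)),
    P.Nodup → (∀ p ∈ P, ¬ p ∈ S) →
    (P.foldl (pvStepA cs n m) (acc, S)).1 = acc ++ P.flatMap (pvEmitA cs n m) := by
  intro P
  induction P with
  | nil => intro acc S _ _; simp
  | cons p t IH =>
    intro acc S hnd hS
    rw [List.foldl_cons]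
    have hc : PySem.Set.contains S p = false := by
      rw [← Bool.not_eq_true, PySem.Set.contains_iff]
      exact hS p List.mem_cons_self
    have hstep : pvStepA cs n m (acc, S) p =
        (acc ++ pvEmitA cs n m p,
         if p.2 ≥ p.1 + pvExtendA cs n p.1 p.2 m then PySem.Set.add S p else S) := by
      rw [pvStepA, hc]
      simp only [Bool.false_eq_true, if_false, pvEmitA]
      by_cases hemit : p.2 ≥ p.1 + pvExtendA cs n p.1 p.2 m
      · rw [if_pos hemit, if_pos hemit, if_pos hemit]
      · rw [if_neg hemit, if_neg hemit, if_neg hemit]; simp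
    rw [hstep]
    rw [IH (acc ++ pvEmitA cs n m p) _ (List.nodup_cons.mp hnd).2 ?hfresh]
    · rw [List.flatMap_cons, List.append_assoc]
    case hfresh =>
      intro q hq
      by_cases hemit : p.2 ≥ p.1 + pvExtendA cs n p.1 p.2 m
      · rw [if_pos hemit, PySem.Set.mem_add]
        rintro (hmem | rfl)
        · exact hS q (List.mem_cons_of_mem _ hq) hmem
        · exact (List.nodup_cons.mp hnd).1 hq
      · rw [if_neg hemit]
        exact hS q (List.mem_cons_of_mem _ hq)

def pvInvD (cs : List Char) (n : Int) (D : PySem.Dict Int (List Int)) : Prop :=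
  ∀ d v, D.get? d = some v → v = pvArr cs n d

theorem pvFoldB_char (cs : List Char) (n : Int) : ∀ (P : List (Int × Int))
    (acc : List (Int × Int × Int)) (D : PySem.Dict Int (List Int)),
    pvInvD cs n D →
    (P.foldl (pvStepB cs n) (acc, D)).1 = acc ++ P.flatMap (pvEmitB cs n) := by
  intro P
  induction P with
  | nil => intro acc D _; simp
  | cons p t IH =>
    intro acc D hinv
    rw [List.foldl_cons]
    have hstep : ∃ D', pvStepB cs n (acc, D) p = (acc ++ pvEmitB cs n p, D') ∧ pvInvD cs n D' := by
      rw [pvStepB, pvEmitB]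
      cases hg : PySem.Dict.get? D (p.2 - p.1) with
      | some marr =>
        have hm := hinv _ _ hg
        subst hm
        refine ⟨D, ?_, hinv⟩
        by_cases hemit : p.2 - p.1 ≥ PySem.List.pyGetD (pvArr cs n (p.2 - p.1)) p.1 0
        · simp only [if_pos hemit]
        · simp only [if_neg hemit]; simp
      | none =>
        refine ⟨D.insert (p.2 - p.1) (pvArr cs n (p.2 - p.1)), ?_, ?_⟩
        · by_cases hemit : p.2 - p.1 ≥ PySem.List.pyGetD (pvArr cs n (p.2 - p.1)) p.1 0
          · simp only [if_pos hemit]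
          · simp only [if_neg hemit]; simp
        · intro d v hv
          by_cases hd : d = p.2 - p.1
          · subst hd
            rw [PySem.Dict.get?_insert_self] at hv
            exact (Option.some_inj.mp hv).symm
          · rw [PySem.Dict.get?_insert_of_ne _ _ hd] at hv
            exact hinv d v hv
    rcases hstep with ⟨D', hD', hinv'⟩
    rw [hD', IH _ _ hinv', List.flatMap_cons, List.append_assoc]

-- goodness of the enumerated pairs ------------------------------------------

theorem pvAllPairs_good (cs : List Char) (m : Int) :
    ∀ p ∈ pvAllPairs cs m, pvGood cs m p := by
  intro p hp
  rcases List.mem_flatMap.mp hp with ⟨k, hk, hpk⟩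
  have hpw : (pvPos cs m k).Pairwise (· < ·) :=
    (PySem.List.pairwise_lt_pyRange_one 0 ((cs.length : Int) - m + 1)).filter _
  have hmem := pvPairs_mem (pvPos cs m k) hpw p hpk
  have h1 := List.mem_filter.mp hmem.1
  have h2 := List.mem_filter.mp hmem.2.1
  have hb1 := PySem.List.mem_pyRange_one.mp h1.1
  have hb2 := PySem.List.mem_pyRange_one.mp h2.1
  refine ⟨hb1.1, hmem.2.2, by omega, ?_⟩
  have e1 : pvKmer cs m p.1 = k := by simpa using h1.2
  have e2 : pvKmer cs m p.2 = k := by simpa using h2.2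
  rw [e1, e2]

theorem pvAllPairs_nodup (cs : List Char) (m : Int) : (pvAllPairs cs m).Nodup := by
  rw [pvAllPairs, List.nodup_flatMap]
  constructor
  · intro k _
    exact pvPairs_nodup _ ((PySem.List.pairwise_lt_pyRange_one 0 ((cs.length : Int) - m + 1)).filter _)
  · have hnd : (pvKeys cs m).Nodup := PySem.Set.nodup_ofList _
    refine hnd.imp ?_
    intro k k' hne p hp hp'
    have e1 : pvKmer cs m p.1 = k := by
      simpa using (List.mem_filter.mp (pvPairs_fst_mem _ p hp)).2
    have e2 : pvKmer cs m p.1 = k' := by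
      simpa using (List.mem_filter.mp (pvPairs_fst_mem _ p hp')).2
    exact hne (e1 ▸ e2)

-- per-pair agreement ---------------------------------------------------------

theorem pvEmit_agree (cs : List Char) (m : Int) (hm : 0 ≤ m) (hN : m * 2 ≤ (cs.length : Int))
    (p : Int × Int) (hp : pvGood cs m p) :
    pvEmitA cs (cs.length : Int) m p = pvEmitB cs (cs.length : Int) p := by
  obtain ⟨h1, h12, h2N, hkm⟩ := hp
  set a := p.1.toNat with ha
  set b := p.2.toNat with hb
  set K := m.toNat with hK
  have hmN : m ≤ (cs.length : Int) := by omega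
  -- pointwise character equality on the kmer window
  have hchars : ∀ t, t < K → cs[a + t]? = cs[b + t]? := by
    intro t ht
    have hs1 : pvKmer cs m p.1 = (cs.drop a).take K := by
      rw [pvKmer, show p.1 = ((a : Nat) : Int) by omega, show ((a : Nat) : Int) + m = ((a : Nat) : Int) + ((K : Nat) : Int) by omega]
      exact PySem.List.slice_natCast_add cs a K
    have hs2 : pvKmer cs m p.2 = (cs.drop b).take K := by
      rw [pvKmer, show p.2 = ((b : Nat) : Int) by omega, show ((b : Nat) : Int) + m = ((b : Nat) : Int) + ((K : Nat) : Int) by omega]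
      exact PySem.List.slice_natCast_add cs b K
    have heq : (cs.drop a).take K = (cs.drop b).take K := by rw [← hs1, ← hs2, hkm]
    have g1 : cs[a + t]? = ((cs.drop a).take K)[t]? := by
      rw [List.getElem?_take_of_lt ht, List.getElem?_drop]
    have g2 : cs[b + t]? = ((cs.drop b).take K)[t]? := by
      rw [List.getElem?_take_of_lt ht, List.getElem?_drop]
    rw [g1, g2, heq]
  have hshift := pvLcp_shift cs K a b (by omega) hchars
  -- A's length
  have hA : pvExtendA cs (cs.length : Int) p.1 p.2 m
      = m + (pvLcp cs (a + K) (b + K) : Int) := by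
    have := pvExtendA_eq_lcp cs p.1 p.2 h1 h12 m hm
    rw [this, show (p.1 + m).toNat = a + K by omega, show (p.2 + m).toNat = b + K by omega]
  -- B's length
  have hB : PySem.List.pyGetD (pvArr cs (cs.length : Int) (p.2 - p.1)) p.1 0
      = m + (pvLcp cs (a + K) (b + K) : Int) := by
    have hd1 : 1 ≤ p.2 - p.1 := by omega
    have hdn : p.2 - p.1 ≤ (cs.length : Int) := by omega
    have hu : a ≤ cs.length - (p.2 - p.1).toNat := by omega
    have hgd : PySem.List.pyGetD (pvArr cs (cs.length : Int) (p.2 - p.1)) p.1 0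
        = (pvArr cs (cs.length : Int) (p.2 - p.1)).getD a 0 := by
      rw [show p.1 = ((a : Nat) : Int) by omega, PySem.List.pyGetD_natCast]
    rw [hgd, pvArr_getD cs (p.2 - p.1) hd1 hdn a hu,
        show a + (p.2 - p.1).toNat = b by omega, hshift]
    push_cast
    omega
  rw [pvEmitA, pvEmitB, hA, hB]
  by_cases hemit : p.2 ≥ p.1 + (m + (pvLcp cs (a + K) (b + K) : Int))
  · rw [if_pos hemit, if_pos (by omega)]
  · rw [if_neg hemit, if_neg (by omega)]

-- assembly -------------------------------------------------------------------

theorem pvGroupA_eq (cs : List Char) (n m : Int) (ps : List Int)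
    (st : List (Int × Int × Int) × PySem.Set (Int × Int)) :
    (if PySem.List.len ps < 2 then st else
      (PySem.List.pyRange 0 (PySem.List.len ps) 1).foldl
        (fun st (a_idx : Int) =>
          (PySem.List.pyRange (a_idx + 1) (PySem.List.len ps) 1).foldl
            (fun st (b_idx : Int) =>
              let i := PySem.List.pyGetD ps a_idx 0
              let j := PySem.List.pyGetD ps b_idx 0
              if PySem.Set.contains st.2 (i, j) then st else
              let length := pvExtendA cs n i j m
              if j ≥ i + length then (st.1 ++ [(i, j, length)], PySem.Set.add st.2 (i, j))
              else st)
            st)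
        st)
    = (pvPairs ps).foldl (pvStepA cs n m) st := by
  by_cases hlen : PySem.List.len ps < 2
  · rw [if_pos hlen]
    have : ps.length < 2 := by
      have := hlen; rw [PySem.List.len_eq] at this; exact_mod_cast this
    match ps, this with
    | [], _ => rfl
    | [x], _ => simp [pvPairs]
  · rw [if_neg hlen]
    exact pvPy_pairs_fold (fun st i j => pvStepA cs n m st (i, j)) ps st

theorem pvGroupB_eq (cs : List Char) (n : Int) (ps : List Int)
    (st : List (Int × Int × Int) × PySem.Dict Int (List Int)) :
    ((PySem.List.pyRange 0 (PySem.List.len ps - 1) 1).foldl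
        (fun st (a_idx : Int) =>
          let i := PySem.List.pyGetD ps a_idx 0
          (PySem.List.pyRange (a_idx + 1) (PySem.List.len ps) 1).foldl
            (fun st (b_idx : Int) =>
              let j := PySem.List.pyGetD ps b_idx 0
              let d := j - i
              match st.2.get? d with
              | some marr =>
                let length := PySem.List.pyGetD marr i 0
                if d ≥ length then (st.1 ++ [(i, j, length)], st.2) else st
              | none =>
                let marr := (PySem.List.pyRange (n - d - 1) (-1) (-1)).foldl
                    (fun marr t => PySem.List.pySetD marr t
                      (if PySem.List.pyGet? cs t = PySem.List.pyGet? cs (t + d)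
                       then PySem.List.pyGetD marr (t + 1) 0 + 1 else 0))
                    (List.replicate (n - d + 1).toNat 0)
                let diag := st.2.insert d marr
                let length := PySem.List.pyGetD marr i 0
                if d ≥ length then (st.1 ++ [(i, j, length)], diag) else (st.1, diag))
            st)
        st)
    = (pvPairs ps).foldl (pvStepB cs n) st :=
  pvPy_pairs_fold_B (fun st i j => pvStepB cs n st (i, j)) ps st

theorem pvKmer_fold (cs : List Char) (m i : Int) :
    PySem.List.slice cs (some i) (some (i + m)) = pvKmer cs m i := rfl

theorem pvIdxs_fold (cs : List Char) (m : Int) :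
    PySem.List.pyRange 0 ((cs.length : Int) - m + 1) 1 = pvIdxs cs m := rfl

theorem pv_main (dna : String) (min_len : Int) (hm : 0 ≤ min_len) :
    find_direct_repeats dna min_len = find_direct_repeats_alt dna min_len := by
  rw [find_direct_repeats, find_direct_repeats_alt]
  simp only [PySem.List.len_eq]
  set cs := PySem.Chars.upper dna.toList with hcs
  by_cases hg : (cs.length : Int) < min_len * 2
  · rw [if_pos hg, if_pos hg]
  · rw [if_neg hg, if_neg hg]
    congr 1
    simp only [pvKmer_fold, pvIdxs_fold]
    rw [pvKp_values cs min_len]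
    trans ((pvAllPairs cs min_len).flatMap (pvEmitA cs (cs.length : Int) min_len))
    · -- A's fold
      rw [List.foldl_map]
      refine Eq.trans (congrArg Prod.fst
        ((PySem.List.foldl_congr_mem _ _ _ _
            (fun acc k (_ : k ∈ pvKeys cs min_len) =>
              pvGroupA_eq cs (cs.length : Int) min_len (pvPos cs min_len k) acc)).trans
          List.foldl_flatMap.symm)) ?_
      exact (pvFoldA_char cs (cs.length : Int) min_len (pvAllPairs cs min_len) []
        PySem.Set.empty (pvAllPairs_nodup cs min_len)
        (by intro p _ hp; simp [PySem.Set.empty] at hp)).trans (by simp)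
    · -- B's fold
      symm
      rw [List.foldl_map]
      refine Eq.trans (congrArg Prod.fst
        ((PySem.List.foldl_congr_mem _ _ _ _
            (fun acc k (_ : k ∈ pvKeys cs min_len) =>
              pvGroupB_eq cs (cs.length : Int) (pvPos cs min_len k) acc)).trans
          List.foldl_flatMap.symm)) ?_
      refine Eq.trans (pvFoldB_char cs (cs.length : Int) (pvAllPairs cs min_len) [] PySem.Dict.empty
        (by intro d v h; rw [PySem.Dict.get?_empty] at h; exact absurd h (by simp))) ?_
      simp only [List.nil_append]
      exact List.flatMap_congr (fun p hp =>
        (pvEmit_agree cs min_len hm (by omega) p (pvAllPairs_good cs min_len p hp)).symm)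

-- ===== VERDICT (by name: the statement is the Claim_ definition above) =====
theorem find_direct_repeats_spec : Claim_equal_find_direct_repeats := by
  intro dna min_len _ hpre
  unfold Spec_find_direct_repeats
  exact pv_main dna min_len hpre
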